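/- GENERATED by tools/from_farm_form.py from prooffarm-gif/accepted/DGifDecompressLine.5/Lemmas.lean (a worked proof of the farm's unit `DGifDecompressLine.5`,
   accepted by the verdict) — do not edit. -/
import Gif.Spec.Units.DGifDecompressLine_5
import Gif.Spec.AllSegs

/-!
  Lemmas for the unit `DGifDecompressLine.5` (segment 5 of the LZW decoder: the clear loop of l.902-904,
  `for (j = 0; j <= LZ_MAX_CODE; j++) Prefix[j] = NO_SUCH_CODE`).
-/

open X86 X86.User Asan ProgX.Base ProgX.Base.Spec Gif.Spec

namespace Gif.Spec.DGifDecompressLine_5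

/-- **THE INVARIANT OF THE CLEAR LOOP** at its head 106C7EH (`cmp r12d, 0xfff`): the assertion `Mid` of the segment's entry (at the
head's address), and `r12d = j`, `j ≤ 4096`. -/
structure dl5_AtHead (j : Nat) (m : Nat) (H : Heap) (rest : List Obj) (frames : List (Nat × FrameLayout)) (F : Forest) (R : Rd)
    (n : Nat) (u₀ e : State) (ret : Word) (v : State) : Prop where
  /-- `Mid`, at the loop head -/
  mid : DGifDecompressLine.Mid Gif.L.DGifDecompressLine.loop2 m H rest frames F R n u₀ e ret v
  /-- `r12d = j` (the upper half is 0: written by `mov r12d, 0` / `add r12d, 1`) -/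
  r12 : v.reg .r12 = UInt64.ofNat j
  /-- `j ≤ 4096` -/
  le : j ≤ 4096

set_option maxRecDepth 4000 in
set_option maxHeartbeats 4000000 in
/-- **The entry of the segment** (106CFBH `mov r12d, 0` ; 106D01H `jmp 106C7E`, l.902 `j = 0`): nothing stored; the head of the
clear loop with `j = 0`. -/
theorem dl5_enter {Lay : Layout} (hLay : Lay.hi = 0x1000000) {μ : Microarch} (hμ : UserX.MicroOK μ) {u₀ : State}
    (hcode : HasCodeNat Lay u₀ Gif.L.DGifDecompressLine.entry Gif.Code.code_DGifDecompressLine.nat Gif.L.DGifDecompressLine.size)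
    {H : Heap} {rest : List Obj} {frames : List (Nat × FrameLayout)} {F : Forest} {R : Rd} {n m : Nat} {e : State} {ret : Word}
    {v : State}
    (hat : DGifDecompressLine.Mid Gif.L.DGifDecompressLine.at_106cfb m H rest frames F R n u₀ e ret v) :
    ReachVia Lay μ WayInv v (dl5_AtHead 0 m H rest frames F R n u₀ e ret) := by
  obtain ⟨⟨hbody, hloc, h_r14, h_r13, h_rbx, h_rbp, h_w1⟩, h_lt, h_sp0, h_mu⟩ := hat
  have he := hbody.entry
  v_entry he
  have hgin := hbody.gif_inside
  have hpin := hbody.pv_inside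
  have w_rip := hbody.rip
  have c_rsp : v.reg .rsp = e.reg .rsp - 200 := hbody.rsp
  have w_eq : Mem.EqOn ProgX.Base.L.textLo ProgX.Base.L.textHi u₀.mem v.mem := ProgX.Base.conv_code_eqOn hbody.code
  have hdf : v.flags .df = false := (show abiInv _ from hbody.abi).1
  have hmx : v.mxcsr &&& 0x1F80 = 0x1F80 := (show abiInv _ from hbody.abi).2
  have hsse := ProgX.Base.sseOK_of_abiInv hbody.abi
  have w_kept : RegsKept [.rsp] v v := RegsKept.refl _ _
  u_walk hcode [hμ.vendor] until [Gif.L.DGifDecompressLine.loop2]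
    span [ProgX.Base.L.textLo, ProgX.Base.L.textHi] side (v_side)
  -- 106C7EH: the head; nothing was stored: `Mid` again (`Body.moved`, `Locals.moved`), `r12d = 0`
  have habi : (conv u₀).inv s_106d01 := by v_inv
  refine ReachVia.done ⟨⟨⟨hbody.moved w_rip w_rsp w_mem habi, hloc.moved w_mem, ?_, ?_, ?_, ?_, ?_⟩, ?_, ?_, ?_⟩, ?_, ?_⟩
  · rw [w_kept .r14 rfl]
    exact h_r14
  · rw [w_kept .r13 rfl]
    exact h_r13
  · rw [w_kept .rbx rfl]
    exact h_rbx
  · rw [w_kept .rbp rfl]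
    exact h_rbp
  · rw [w_kept .rbp rfl, w_kept .rbx rfl]
    exact h_w1
  · rw [w_kept .rbp rfl]
    exact h_lt
  · rw [w_kept .rbx rfl]
    exact h_sp0
  · rw [w_mem]
    exact h_mu
  · rw [w_r12]
    rfl
  · omega

set_option maxRecDepth 4000 in
set_option maxHeartbeats 4000000 in
/-- **ONE ROUND OF THE CLEAR LOOP** (from the head 106C7EH, l.902): `j ≤ 4095` false: 106C87H with `Mid`, nothing stored; true: the
checked store `Prefix[j] = NO_SUCH_CODE` (106C63H … 106C7AH, l.903: inside `Prefix[4096]`), `j + 1`, the head again. -/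
theorem dl5_round {Lay : Layout} (hLay : Lay.hi = 0x1000000) {μ : Microarch} (hμ : UserX.MicroOK μ) {u₀ : State}
    (hcode : HasCodeNat Lay u₀ Gif.L.DGifDecompressLine.entry Gif.Code.code_DGifDecompressLine.nat Gif.L.DGifDecompressLine.size)
    (h_store4 : Asan.SmallCheck Lay μ ProgX.Base.WayInv (ProgX.Base.CodeOK u₀) [.rax, .rcx, .rdx] 4
      ProgX.Base.L.__asan_store4_noabort.entry)
    {H : Heap} {rest : List Obj} {frames : List (Nat × FrameLayout)} {F : Forest} {R : Rd} {n m j : Nat} {e : State} {ret : Word}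
    {v : State}
    (hat : dl5_AtHead j m H rest frames F R n u₀ e ret v) :
    ReachVia Lay μ WayInv v (fun w =>
      DGifDecompressLine.Mid Gif.L.DGifDecompressLine.at_106c87 m H rest frames F R n u₀ e ret w ∨
      (j ≤ 4095 ∧ dl5_AtHead (j + 1) m H rest frames F R n u₀ e ret w)) := by
  obtain ⟨⟨⟨hbody, hloc, h_r14, h_r13, h_rbx, h_rbp, h_w1⟩, h_lt, h_sp0, h_mu⟩, c_r12, hj⟩ := hat
  -- THE PRELUDE (Gif/Spec/LzwCarry.lean §2)
  have he := hbody.entry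
  v_entry he
  have hgin := hbody.gif_inside
  have hpin := hbody.pv_inside
  have w_rip := hbody.rip
  have c_rsp : v.reg .rsp = e.reg .rsp - 200 := hbody.rsp
  have w_eq : Mem.EqOn ProgX.Base.L.textLo ProgX.Base.L.textHi u₀.mem v.mem := ProgX.Base.conv_code_eqOn hbody.code
  have hdf : v.flags .df = false := (show abiInv _ from hbody.abi).1
  have hmx : v.mxcsr &&& 0x1F80 = 0x1F80 := (show abiInv _ from hbody.abi).2
  have hsse := ProgX.Base.sseOK_of_abiInv hbody.abi
  have w_kept : RegsKept [.rsp] v v := RegsKept.refl _ _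
  -- `r12d = j`, a small number: `movsxd rax, r12d` is `j`
  have hj31 : j < 2 ^ 31 := by omega
  u_walk hcode [hμ.vendor, Gif.Spec.cnt32_sext j hj31]
    until [Gif.L.DGifDecompressLine.loop2, Gif.L.DGifDecompressLine.at_106c87]
    span [ProgX.Base.L.textLo, ProgX.Base.L.textHi] side (v_side)
  case check_106c6e =>
    -- l.903 `Prefix[j] =`: inside `Prefix[4096]` (`j ≤ 4095` by the loop test)
    have e4095 : (4095#32).toInt = 4095 := by decide
    rw [Gif.Spec.cnt32_part_toInt j hj31, e4095] at hbr_106c85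
    have hun : ShadowUntouched v.mem s_106c6e.mem := by v_untouched
    have hl := prefixLive hbody.ok.pv_live rest (DGifDecompressLine.framesIn frames e) j (by omega)
    simp only [gfield] at hl
    exact hl.accSmall hbody.inv.shadow hun _ 4 (by decide) (by u_omega) (by u_omega)
  · -- THE BACK EDGE 106C7EH (l.902): `j ≤ 4095`; the head again with `j + 1`
    have e4095 : (4095#32).toInt = 4095 := by decide
    rw [Gif.Spec.cnt32_part_toInt j hj31, e4095] at hbr_106c85
    have hj95 : j ≤ 4095 := by omega
    -- what was stored: the return address of the check, `Prefix[j]`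
    have hun : ShadowUntouched v.mem s_106c7a.mem := by v_untouched
    have hsame : Mem.SameExcept [⟨(e.reg .rsp).toNat - 208, (e.reg .rsp).toNat - 200⟩, ⟨F.pv + 8536, F.pv + 24920⟩]
        v.mem s_106c7a.mem := by
      rw [w_mem]
      u_same
    have habi : (conv u₀).inv s_106c7a := by v_inv
    obtain ⟨k_body, k_loc, k_mu, k_clear, k_eof⟩ :=
      hbody.carry (cut' := Gif.L.DGifDecompressLine.loop2) w_rip w_rsp w_eq habi hun hsame (by dl_scratch)
    refine ReachVia.done (Or.inr ⟨hj95, ⟨⟨k_body, k_loc hloc, ?_, ?_, ?_, ?_, ?_⟩, ?_, ?_, ?_⟩, ?_, ?_⟩)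
    · rw [w_kept .r14 rfl]
      exact h_r14
    · rw [w_kept .r13 rfl]
      exact h_r13
    · rw [w_kept .rbx rfl]
      exact h_rbx
    · rw [w_kept .rbp rfl]
      exact h_rbp
    · rw [w_kept .rbp rfl, w_kept .rbx rfl]
      exact h_w1
    · rw [w_kept .rbp rfl]
      exact h_lt
    · rw [w_kept .rbx rfl]
      exact h_sp0
    · -- the measure of the main loop: no store of the round touched it
      rw [k_mu]
      exact h_mu
    · -- `add r12d, 1`
      rw [w_r12]
      exact Gif.Spec.cnt32_succ j (by omega)
    · omega
  · -- THE EXIT 106C87H (l.905): `j > 4095`; nothing was stored: `Mid` again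
    have habi : (conv u₀).inv s_106c85 := by v_inv
    refine ReachVia.done (Or.inl ⟨⟨hbody.moved w_rip w_rsp w_mem habi, hloc.moved w_mem, ?_, ?_, ?_, ?_, ?_⟩, ?_, ?_, ?_⟩)
    · rw [w_kept .r14 rfl]
      exact h_r14
    · rw [w_kept .r13 rfl]
      exact h_r13
    · rw [w_kept .rbx rfl]
      exact h_rbx
    · rw [w_kept .rbp rfl]
      exact h_rbp
    · rw [w_kept .rbp rfl, w_kept .rbx rfl]
      exact h_w1
    · rw [w_kept .rbp rfl]
      exact h_lt
    · rw [w_kept .rbx rfl]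
      exact h_sp0
    · rw [w_mem]
      exact h_mu

/-- **THE CLEAR LOOP** (l.902-904), from its head with `r12d = j`: by induction on the measure `4096 − j`, one `dl5_round` per
round, to the exit 106C87H with `Mid`. -/
theorem dl5_loop {Lay : Layout} (hLay : Lay.hi = 0x1000000) {μ : Microarch} (hμ : UserX.MicroOK μ) {u₀ : State}
    (hcode : HasCodeNat Lay u₀ Gif.L.DGifDecompressLine.entry Gif.Code.code_DGifDecompressLine.nat Gif.L.DGifDecompressLine.size)
    (h_store4 : Asan.SmallCheck Lay μ ProgX.Base.WayInv (ProgX.Base.CodeOK u₀) [.rax, .rcx, .rdx] 4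
      ProgX.Base.L.__asan_store4_noabort.entry)
    {H : Heap} {rest : List Obj} {frames : List (Nat × FrameLayout)} {F : Forest} {R : Rd} {n m : Nat} {e : State} {ret : Word}
    (k : Nat) :
    ∀ (j : Nat) (v : State), 4096 - j = k → dl5_AtHead j m H rest frames F R n u₀ e ret v →
      ReachVia Lay μ WayInv v (DGifDecompressLine.Mid Gif.L.DGifDecompressLine.at_106c87 m H rest frames F R n u₀ e ret) := by
  induction k with
  | zero =>
    -- the measure is 0: `j = 4096`, the round leaves the loop
    intro j v hk hat
    refine (dl5_round hLay hμ hcode h_store4 hat).trans ?_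
    intro w hw
    rcases hw with hw | ⟨hj95, _⟩
    · exact ReachVia.done hw
    · omega
  | succ k ih =>
    intro j v hk hat
    refine (dl5_round hLay hμ hcode h_store4 hat).trans ?_
    intro w hw
    rcases hw with hw | ⟨hj95, hw⟩
    · exact ReachVia.done hw
    · -- the head again with `j + 1`: the measure went down
      exact ih (j + 1) w (by omega) hw

end Gif.Spec.DGifDecompressLine_5
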